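-- pv_equiv track=rewrite | github.com/qidanta/OpencvLearning | test_alippa2.py | create_rect_grah
-- ===== SOURCE A (Python) =====
-- def create_rect_grah(n, distance):
--     grah = {}
--     for row in range(n):
--         for col in range(n):
--             line = {}
--             nodes = [(row - 1, col), (row, col - 1), (row, col + 1), (row + 1, col)]
--             for node in nodes:
--                 if n> node[0] >= 0 and n > node[1] >= 0:
--                     index = node[0] * n + node[1] + 1
--                     line[index] = distance
--             index = row * n + col + 1
--             line[index] = 0
--             grah[index] = line
--     return grah
-- ===== SOURCE B (Python) =====
-- def create_rect_grah(n, distance):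
--     # Edge-pass construction: collect each undirected grid edge once (right/down
--     # from each cell) into per-cell neighbour lists, then assemble the adjacency dict.
--     nbrs = [[] for _ in range(n) for _ in range(n)]
--     for r in range(n):
--         for c in range(n):
--             p = r * n + c
--             if c + 1 < n:
--                 nbrs[p].append(p + 1)
--                 nbrs[p + 1].append(p)
--             if r + 1 < n:
--                 nbrs[p].append(p + n)
--                 nbrs[p + n].append(p)
--     grah = {}
--     for r in range(n):
--         for c in range(n):
--             p = r * n + c
--             line = {}
--             for q in nbrs[p]:
--                 line[q + 1] = distance
--             line[p + 1] = 0
--             grah[p + 1] = line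
--     return grah
-- ===== Notes on version B (the rewrite author's own statement) =====
-- stated objective: alternative
-- what changed: A scans each node's four neighbour candidates with per-candidate bounds checks; B makes one edge pass that records each undirected grid edge once from its left/upper endpoint into per-cell neighbour lists and then assembles the adjacency dict from them.
import Mathlib
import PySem

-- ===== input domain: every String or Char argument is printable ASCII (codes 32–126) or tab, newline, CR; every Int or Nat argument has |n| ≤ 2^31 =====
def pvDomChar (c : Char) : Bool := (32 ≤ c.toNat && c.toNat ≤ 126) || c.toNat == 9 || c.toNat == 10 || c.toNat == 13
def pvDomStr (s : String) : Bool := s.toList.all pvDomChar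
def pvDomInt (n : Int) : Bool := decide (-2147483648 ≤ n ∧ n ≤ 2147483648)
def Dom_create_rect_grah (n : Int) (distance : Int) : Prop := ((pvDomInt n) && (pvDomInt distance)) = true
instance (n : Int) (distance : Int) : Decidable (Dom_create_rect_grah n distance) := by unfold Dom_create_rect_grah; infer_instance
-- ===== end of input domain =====

-- B replaces A's per-node four-neighbour bounds-checked scan by one edge pass that records each
-- grid edge once from its left/upper endpoint (objective: alternative; same result, same order).

-- ===== PORT A =====
def create_rect_grah (n : Int) (distance : Int) : List (Int × List (Int × Int)) :=
  ((PySem.List.pyRange 0 n 1).foldl (fun grah row =>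
    (PySem.List.pyRange 0 n 1).foldl (fun (grah : PySem.Dict Int (List (Int × Int))) col =>
      let nodes : List (Int × Int) := [(row - 1, col), (row, col - 1), (row, col + 1), (row + 1, col)]
      let line : PySem.Dict Int Int := nodes.foldl (fun line node =>
        if node.1 < n ∧ 0 ≤ node.1 ∧ node.2 < n ∧ 0 ≤ node.2 then
          line.insert (node.1 * n + node.2 + 1) distance
        else line) (PySem.Dict.mk [])
      let line := line.insert (row * n + col + 1) 0
      grah.insert (row * n + col + 1) line.items) grah) (PySem.Dict.mk [])).items

-- ===== PORT B =====
-- nbrs[i].append(x): in B this index is always in range (0 ≤ i < n*n), so this total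
-- recursion is exact for Python's list indexing at every point B uses it.
def pvAppendAt (xs : List (List Int)) (i : Int) (x : Int) : List (List Int) :=
  match xs with
  | [] => []
  | l :: t => if i = 0 then (l ++ [x]) :: t else l :: pvAppendAt t (i - 1) x

-- nbrs[i]: same remark, the index is always in range where B reads.
def pvGetAt (xs : List (List Int)) (i : Int) : List Int :=
  match xs with
  | [] => []
  | l :: t => if i = 0 then l else pvGetAt t (i - 1)

def create_rect_grah_alt (n : Int) (distance : Int) : List (Int × List (Int × Int)) :=
  let nbrs : List (List Int) :=
    (PySem.List.pyRange 0 n 1).flatMap (fun _ => (PySem.List.pyRange 0 n 1).map (fun _ => ([] : List Int)))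
  let nbrs := (PySem.List.pyRange 0 n 1).foldl (fun nbrs r =>
    (PySem.List.pyRange 0 n 1).foldl (fun nbrs c =>
      let p := r * n + c
      let nbrs := if c + 1 < n then pvAppendAt (pvAppendAt nbrs p (p + 1)) (p + 1) p else nbrs
      if r + 1 < n then pvAppendAt (pvAppendAt nbrs p (p + n)) (p + n) p else nbrs) nbrs) nbrs
  ((PySem.List.pyRange 0 n 1).foldl (fun grah r =>
    (PySem.List.pyRange 0 n 1).foldl (fun (grah : PySem.Dict Int (List (Int × Int))) c =>
      let p := r * n + c
      let line : PySem.Dict Int Int :=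
        (pvGetAt nbrs p).foldl (fun line q => line.insert (q + 1) distance) (PySem.Dict.mk [])
      let line := line.insert (p + 1) 0
      grah.insert (p + 1) line.items) grah) (PySem.Dict.mk [])).items

-- ===== PRECONDITION & SPEC =====
def Spec_create_rect_grah (n : Int) (distance : Int) (out : List (Int × List (Int × Int))) : Prop := out = create_rect_grah_alt n distance
instance (n : Int) (distance : Int) (out : List (Int × List (Int × Int))) : Decidable (Spec_create_rect_grah n distance out) := by unfold Spec_create_rect_grah; infer_instance

-- ===== CLAIM (what is proved, stated in full; the proofs are below) =====
def Claim_equal_create_rect_grah : Prop := ∀ (n : Int) (distance : Int), Dom_create_rect_grah n distance → Spec_create_rect_grah n distance (create_rect_grah n distance)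

-- ===== LEMMAS AND PROOFS =====

-- the neighbour list of cell p after the edge pass has processed the first k cells
def pvPartial (n k p : Int) : List Int :=
  (if n ≤ p ∧ p - n < k then [p - n] else []) ++
  (if p % n ≠ 0 ∧ p - 1 < k then [p - 1] else []) ++
  (if p < k ∧ (p + 1) % n ≠ 0 then [p + 1] else []) ++
  (if p < k ∧ p + n < n * n then [p + n] else [])

-- the line dict of cell p, as an items list
def pvLine (n distance p : Int) : List (Int × Int) :=
  (pvPartial n (n * n) p).map (fun q => (q + 1, distance)) ++ [(p + 1, 0)]

-- the graph dict after the first k cells, as an items list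
def pvGrah (n distance k : Int) : List (Int × List (Int × Int)) :=
  (PySem.List.pyRange 0 k 1).map (fun p => (p + 1, pvLine n distance p))

lemma pyRange_one_nil {a b : Int} (h : b ≤ a) : PySem.List.pyRange a b 1 = [] := by
  simp [PySem.List.pyRange]
  intro h2; omega

-- generic simulation of a fold over range(a, b) by a state family
lemma foldl_range_sim {σ : Type} (g : σ → Int → σ) (S : Int → σ) (a b : Int)
    (hab : a ≤ b) (h : ∀ c, a ≤ c → c < b → g (S c) c = S (c + 1)) :
    (PySem.List.pyRange a b 1).foldl g (S a) = S b := by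
  obtain ⟨k, hk⟩ : ∃ k : Nat, b - a = k := ⟨(b - a).toNat, by omega⟩
  induction k generalizing a with
  | zero => rw [pyRange_one_nil (by omega)]; simp; congr 1; omega
  | succ m ih =>
    rw [PySem.List.pyRange_one_cons (by omega)]
    simp only [List.foldl_cons]
    rw [h a (le_refl a) (by omega)]
    exact ih (a + 1) (by omega) (fun c h1 h2 => h c (by omega) h2) (by omega)

lemma getAt_map_pyRange (f : Int → List Int) {a m i : Int} (h1 : a ≤ i) (h2 : i < m) :
    pvGetAt ((PySem.List.pyRange a m 1).map f) (i - a) = f i := by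
  obtain ⟨k, hk⟩ : ∃ k : Nat, m - a = k := ⟨(m - a).toNat, by omega⟩
  induction k generalizing a with
  | zero => omega
  | succ j ih =>
    rw [PySem.List.pyRange_one_cons (by omega)]
    simp only [List.map_cons, pvGetAt]
    by_cases hia : i = a
    · simp [hia]
    · rw [if_neg (by omega)]
      have := ih (a := a + 1) (by omega) (by omega)
      simpa [show i - a - 1 = i - (a + 1) by omega] using this

lemma getAt_map_pyRange0 (f : Int → List Int) {m i : Int} (h1 : 0 ≤ i) (h2 : i < m) :
    pvGetAt ((PySem.List.pyRange 0 m 1).map f) i = f i := by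
  have := getAt_map_pyRange f (a := 0) h1 h2
  simpa using this

lemma appendAt_map_pyRange (f : Int → List Int) {a m i : Int} (x : Int) (h1 : a ≤ i) (h2 : i < m) :
    pvAppendAt ((PySem.List.pyRange a m 1).map f) (i - a) x
      = (PySem.List.pyRange a m 1).map (fun p => if p = i then f p ++ [x] else f p) := by
  obtain ⟨k, hk⟩ : ∃ k : Nat, m - a = k := ⟨(m - a).toNat, by omega⟩
  induction k generalizing a with
  | zero => omega
  | succ j ih =>
    rw [PySem.List.pyRange_one_cons (by omega)]
    simp only [List.map_cons, pvAppendAt]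
    by_cases hia : i = a
    · rw [if_pos (by omega), if_pos hia.symm]
      have htail : List.map (fun p => if p = i then f p ++ [x] else f p) (PySem.List.pyRange (a+1) m)
          = List.map f (PySem.List.pyRange (a+1) m) := by
        apply List.map_congr_left
        intro p hp
        have := PySem.List.mem_pyRange_one.mp hp
        rw [if_neg (by omega)]
      rw [htail]
    · rw [if_neg (by omega), if_neg (by omega)]
      congr 1
      have := ih (a := a + 1) (by omega) (by omega)
      simpa [show i - a - 1 = i - (a + 1) by omega] using this

lemma appendAt_map_pyRange0 (f : Int → List Int) {m i : Int} (x : Int) (h1 : 0 ≤ i) (h2 : i < m) :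
    pvAppendAt ((PySem.List.pyRange 0 m 1).map f) i x
      = (PySem.List.pyRange 0 m 1).map (fun p => if p = i then f p ++ [x] else f p) := by
  have := appendAt_map_pyRange f (a := 0) x h1 h2
  simpa using this

lemma mk_insert_fresh {α : Type} (l : List (Int × α)) (k : Int) (v : α)
    (h : ∀ q ∈ l, q.1 ≠ k) :
    (PySem.Dict.mk l).insert k v = PySem.Dict.mk (l ++ [(k, v)]) := by
  apply PySem.Dict.ext
  rw [PySem.Dict.items_insert_of_not_contains]
  rw [PySem.Dict.contains_mk]
  simp only [List.any_eq_false, beq_iff_eq]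
  exact h

lemma cell_facts (n r c : Int) (hn : 0 < n) (hr0 : 0 ≤ r) (hr1 : r < n) (hc0 : 0 ≤ c) (hc1 : c < n) :
    0 ≤ r * n + c ∧ r * n + c < n * n ∧ (r * n + c) % n = c ∧
    (n ≤ r * n + c ↔ 1 ≤ r) ∧ (r * n + c + n < n * n ↔ r + 1 < n) ∧
    ((r * n + c + 1) % n = if c + 1 < n then c + 1 else 0) := by
  have h0 : 0 ≤ r * n + c := by positivity
  have hb : r * n ≤ (n - 1) * n := mul_le_mul_of_nonneg_right (by omega) (by omega)
  have hplt : r * n + c < n * n := by nlinarith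
  have hm : (r * n + c) % n = c := by
    have : r * n + c = c + n * r := by ring
    rw [this, Int.add_mul_emod_self_left, Int.emod_eq_of_lt hc0 hc1]
  refine ⟨h0, hplt, hm, ⟨?_, fun h => by nlinarith⟩,
    ⟨fun h => by nlinarith, fun h => by nlinarith [mul_le_mul_of_nonneg_right (show r ≤ n - 2 by omega) (show (0:Int) ≤ n by omega)]⟩, ?_⟩
  · intro h
    rcases (by omega : 1 ≤ r ∨ r = 0) with h' | h'
    · exact h'
    · subst h'; simp at h; omega
  · have e : r * n + c + 1 = (c + 1) + n * r := by ring
    rw [e, Int.add_mul_emod_self_left]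
    split_ifs with h
    · exact Int.emod_eq_of_lt (by omega) h
    · have : c + 1 = n := by omega
      simp [this]

lemma pvPartial_rc (n r c : Int) (hn : 0 < n) (hr0 : 0 ≤ r) (hr1 : r < n) (hc0 : 0 ≤ c) (hc1 : c < n) :
    pvPartial n (n * n) (r * n + c) =
      (if 1 ≤ r then [r * n + c - n] else []) ++
      (if 1 ≤ c then [r * n + c - 1] else []) ++
      (if c + 1 < n then [r * n + c + 1] else []) ++
      (if r + 1 < n then [r * n + c + n] else []) := by
  obtain ⟨h0, hlt, hm, hup, hdown, hm1⟩ := cell_facts n r c hn hr0 hr1 hc0 hc1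
  have e1 : (n ≤ r * n + c ∧ r * n + c - n < n * n) ↔ 1 ≤ r := by
    constructor
    · rintro ⟨h, -⟩; exact hup.mp h
    · intro h; exact ⟨hup.mpr h, by omega⟩
  have e2 : ((r * n + c) % n ≠ 0 ∧ r * n + c - 1 < n * n) ↔ 1 ≤ c := by
    rw [hm]; omega
  have e3 : (r * n + c < n * n ∧ (r * n + c + 1) % n ≠ 0) ↔ c + 1 < n := by
    rw [hm1]; split_ifs with h <;> omega
  have e4 : (r * n + c < n * n ∧ r * n + c + n < n * n) ↔ r + 1 < n := by
    constructor
    · rintro ⟨-, h⟩; exact hdown.mp h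
    · intro h; exact ⟨hlt, hdown.mpr h⟩
  simp only [pvPartial, e1, e2, e3, e4]

-- B's line loop
lemma lineB_items (n d r c : Int) (hn : 0 < n) (hr0 : 0 ≤ r) (hr1 : r < n) (hc0 : 0 ≤ c) (hc1 : c < n) :
    ((((pvPartial n (n * n) (r * n + c)).foldl (fun line q => line.insert (q + 1) d)
        (PySem.Dict.mk [])).insert (r * n + c + 1) 0)).items = pvLine n d (r * n + c) := by
  have hmem : ∀ q ∈ pvPartial n (n * n) (r * n + c), q ≠ r * n + c := by
    rw [pvPartial_rc n r c hn hr0 hr1 hc0 hc1]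
    intro q hq
    simp only [List.mem_append] at hq
    rcases hq with ((h | h) | h) | h <;> (split_ifs at h <;> simp at h <;> omega)
  have hnodup : ((pvPartial n (n * n) (r * n + c)).map (fun q => q + 1)).Nodup := by
    rw [pvPartial_rc n r c hn hr0 hr1 hc0 hc1]
    split_ifs <;> simp <;> omega
  have h1 := PySem.Dict.items_foldl_insert_fresh (pvPartial n (n * n) (r * n + c))
      (fun q => q + 1) (fun _ => d) (PySem.Dict.mk [])
      (by intro a _; simp [PySem.Dict.contains_mk]) hnodup
  have h2 : ((pvPartial n (n * n) (r * n + c)).foldl (fun line q => line.insert (q + 1) d)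
        (PySem.Dict.mk [])) = PySem.Dict.mk ((pvPartial n (n * n) (r * n + c)).map (fun q => (q + 1, d))) := by
    apply PySem.Dict.ext
    simpa using h1
  rw [h2, mk_insert_fresh _ _ _ (by
    intro q hq
    simp only [List.mem_map] at hq
    obtain ⟨a, ha, rfl⟩ := hq
    have := hmem a ha
    simp; omega)]
  rfl

-- A's line loop
lemma lineA_items (n d r c : Int) (hn : 0 < n) (hr0 : 0 ≤ r) (hr1 : r < n) (hc0 : 0 ≤ c) (hc1 : c < n) :
    ((([(r - 1, c), (r, c - 1), (r, c + 1), (r + 1, c)] : List (Int × Int)).foldl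
        (fun line node => if node.1 < n ∧ 0 ≤ node.1 ∧ node.2 < n ∧ 0 ≤ node.2 then
          line.insert (node.1 * n + node.2 + 1) d else line) (PySem.Dict.mk [])).insert
        (r * n + c + 1) 0).items = pvLine n d (r * n + c) := by
  rw [PySem.List.foldl_ite_eq_foldl_filter]
  have hfilt : (([(r - 1, c), (r, c - 1), (r, c + 1), (r + 1, c)] : List (Int × Int)).filter
      (fun node => decide (node.1 < n ∧ 0 ≤ node.1 ∧ node.2 < n ∧ 0 ≤ node.2))) =
      (if 1 ≤ r then [(r - 1, c)] else []) ++ (if 1 ≤ c then [(r, c - 1)] else []) ++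
      (if c + 1 < n then [(r, c + 1)] else []) ++ (if r + 1 < n then [(r + 1, c)] else []) := by
    have c1 : ((r : Int) - 1 < n ∧ 0 ≤ r - 1 ∧ c < n ∧ 0 ≤ c) ↔ 1 ≤ r := by omega
    have c2 : ((r : Int) < n ∧ 0 ≤ r ∧ c - 1 < n ∧ 0 ≤ c - 1) ↔ 1 ≤ c := by omega
    have c3 : ((r : Int) < n ∧ 0 ≤ r ∧ c + 1 < n ∧ 0 ≤ c + 1) ↔ c + 1 < n := by omega
    have c4 : ((r : Int) + 1 < n ∧ 0 ≤ r + 1 ∧ c < n ∧ 0 ≤ c) ↔ r + 1 < n := by omega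
    simp only [List.filter_cons, List.filter_nil, decide_eq_true_eq]
    simp only [c1, c2, c3, c4]
    split_ifs <;> first | rfl | omega
  rw [hfilt]
  set L := (if 1 ≤ r then [((r : Int) - 1, c)] else []) ++ (if 1 ≤ c then [((r : Int), c - 1)] else []) ++
      (if c + 1 < n then [((r : Int), c + 1)] else []) ++ (if r + 1 < n then [((r : Int) + 1, c)] else []) with hL
  have hkeys : L.map (fun a => a.1 * n + a.2 + 1) = (pvPartial n (n * n) (r * n + c)).map (fun q => q + 1) := by
    rw [pvPartial_rc n r c hn hr0 hr1 hc0 hc1, hL]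
    split_ifs <;> simp <;> ring_nf <;> norm_num <;> try constructor <;> try ring
  have hmem : ∀ q ∈ pvPartial n (n * n) (r * n + c), q ≠ r * n + c := by
    rw [pvPartial_rc n r c hn hr0 hr1 hc0 hc1]
    intro q hq
    simp only [List.mem_append] at hq
    rcases hq with ((h | h) | h) | h <;> (split_ifs at h <;> simp at h <;> omega)
  have hnodup : ((pvPartial n (n * n) (r * n + c)).map (fun q => q + 1)).Nodup := by
    rw [pvPartial_rc n r c hn hr0 hr1 hc0 hc1]
    split_ifs <;> simp <;> omega
  have h1 := PySem.Dict.items_foldl_insert_fresh L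
      (fun a => a.1 * n + a.2 + 1) (fun _ => d) (PySem.Dict.mk [])
      (by intro a _; simp [PySem.Dict.contains_mk]) (by rw [hkeys]; exact hnodup)
  have h2 : (L.foldl (fun line node => line.insert (node.1 * n + node.2 + 1) d) (PySem.Dict.mk []))
      = PySem.Dict.mk (L.map (fun a => (a.1 * n + a.2 + 1, d))) := by
    apply PySem.Dict.ext
    simpa using h1
  rw [h2, mk_insert_fresh _ _ _ (by
    intro q hq
    simp only [List.mem_map] at hq
    obtain ⟨a, ha, rfl⟩ := hq
    have hmm : (a.1 * n + a.2 + 1) ∈ L.map (fun a => a.1 * n + a.2 + 1) := List.mem_map_of_mem ha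
    rw [hkeys] at hmm
    simp only [List.mem_map] at hmm
    obtain ⟨q, hq2, hq3⟩ := hmm
    have := hmem q hq2
    simp; omega)]
  have hmap : L.map (fun a => (a.1 * n + a.2 + 1, d)) = (pvPartial n (n * n) (r * n + c)).map (fun q => (q + 1, d)) := by
    have e1 : (fun (a : Int × Int) => (a.1 * n + a.2 + 1, d)) = (fun k => ((k : Int), d)) ∘ (fun a => a.1 * n + a.2 + 1) := rfl
    have e2 : (fun (q : Int) => (q + 1, d)) = (fun k => ((k : Int), d)) ∘ (fun q => q + 1) := rfl
    rw [e1, e2, ← List.map_map, ← List.map_map, hkeys]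
  rw [hmap]
  rfl

-- the common shape of both final passes: a fold inserting (p+1, line of cell p) in cell order
lemma graph_fold_eq (n d : Int) (hn : 0 < n) (v : Int → Int → List (Int × Int))
    (hv : ∀ r c, 0 ≤ r → r < n → 0 ≤ c → c < n → v r c = pvLine n d (r * n + c)) :
    (PySem.List.pyRange 0 n 1).foldl (fun grah r =>
      (PySem.List.pyRange 0 n 1).foldl (fun (grah : PySem.Dict Int (List (Int × Int))) c =>
        grah.insert (r * n + c + 1) (v r c)) grah)
      (PySem.Dict.mk []) = PySem.Dict.mk (pvGrah n d (n * n)) := by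
  have hsucc : ∀ k : Int, 0 ≤ k → pvGrah n d (k + 1) = pvGrah n d k ++ [(k + 1, pvLine n d k)] := by
    intro k hk
    unfold pvGrah
    rw [PySem.List.pyRange_one_succ_right hk]
    simp
  have h0 : (PySem.Dict.mk [] : PySem.Dict Int (List (Int × Int)))
      = (fun r : Int => PySem.Dict.mk (pvGrah n d (r * n))) 0 := by
    simp only
    congr 1
    unfold pvGrah
    rw [pyRange_one_nil (by simp)]
    rfl
  rw [h0, foldl_range_sim _ (fun r : Int => PySem.Dict.mk (pvGrah n d (r * n))) 0 n (le_of_lt hn) ?_]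
  intro r hr0 hr1
  simp only
  have hT0 : (PySem.Dict.mk (pvGrah n d (r * n)) : PySem.Dict Int (List (Int × Int)))
      = (fun c : Int => PySem.Dict.mk (pvGrah n d (r * n + c))) 0 := by
    simp only
    congr 2
    omega
  rw [hT0, foldl_range_sim _ (fun c : Int => PySem.Dict.mk (pvGrah n d (r * n + c))) 0 n (le_of_lt hn) ?_]
  · show (PySem.Dict.mk (pvGrah n d (r * n + n)) : PySem.Dict Int (List (Int × Int))) = _
    congr 2
    ring
  · intro c hc0 hc1
    obtain ⟨hp0, hplt, -, -, -, -⟩ := cell_facts n r c hn hr0 hr1 hc0 hc1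
    rw [hv r c hr0 hr1 hc0 hc1]
    rw [mk_insert_fresh _ _ _ (by
      intro q hq
      unfold pvGrah at hq
      simp only [List.mem_map] at hq
      obtain ⟨p, hp, rfl⟩ := hq
      have := PySem.List.mem_pyRange_one.mp hp
      simp only
      omega)]
    rw [← hsucc (r * n + c) hp0]
    have : r * n + c + 1 = r * n + (c + 1) := by ring
    rw [this]

lemma len_pyRange (m : Int) : (PySem.List.pyRange 0 m 1).length = m.toNat := by
  unfold PySem.List.pyRange
  split_ifs <;> simp <;> omega

lemma flatMap_const_replicate {α β : Type} (l : List α) (k : Nat) (b : β) :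
    l.flatMap (fun _ => List.replicate k b) = List.replicate (l.length * k) b := by
  induction l with
  | nil => simp
  | cons x t ih =>
    simp only [List.flatMap_cons, ih, List.length_cons, Nat.succ_mul, Nat.add_comm]
    rw [List.replicate_append_replicate]

-- the initial all-empty neighbour table
lemma init_eq (n : Int) (hn : 0 < n) :
    (PySem.List.pyRange 0 n 1).flatMap (fun _ => (PySem.List.pyRange 0 n 1).map (fun _ => ([] : List Int)))
      = (PySem.List.pyRange 0 (n * n) 1).map (fun _ => ([] : List Int)) := by
  rw [List.map_const', List.map_const', len_pyRange, flatMap_const_replicate, len_pyRange]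
  congr 1
  rw [len_pyRange, Int.toNat_mul (le_of_lt hn) (le_of_lt hn)]

-- one edge-pass step, seen from an arbitrary cell q
lemma partial_next (n r c q : Int) (hn : 0 < n) (hr0 : 0 ≤ r) (hr1 : r < n) (hc0 : 0 ≤ c) (hc1 : c < n)
    (hq0 : 0 ≤ q) (hq1 : q < n * n) :
    pvPartial n (r * n + c + 1) q =
      (let p := r * n + c
       let b1 := if c + 1 < n ∧ q = p then pvPartial n p q ++ [p + 1] else pvPartial n p q
       let b2 := if c + 1 < n ∧ q = p + 1 then b1 ++ [p] else b1
       let b3 := if r + 1 < n ∧ q = p then b2 ++ [p + n] else b2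
       if r + 1 < n ∧ q = p + n then b3 ++ [p] else b3) := by
  obtain ⟨hp0, hplt, hm, hup, hdown, hm1⟩ := cell_facts n r c hn hr0 hr1 hc0 hc1
  simp only []
  by_cases hqp : q = r * n + c
  · -- q is the cell just processed: it gains its right and down neighbours
    subst hqp
    have ne1 : r * n + c ≠ r * n + c + 1 := by omega
    have ne2 : r * n + c ≠ r * n + c + n := by omega
    simp only [pvPartial, hm, hm1, ne1, eq_self_iff_true, and_true, true_and, and_false,
      false_and, if_false, if_neg (show ¬(r + 1 < n ∧ r * n + c = r * n + c + n) from fun h => ne2 h.2)]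
    have a1 : (n ≤ r * n + c ∧ r * n + c - n < r * n + c + 1) ↔ n ≤ r * n + c := by omega
    have a1' : (n ≤ r * n + c ∧ r * n + c - n < r * n + c) ↔ n ≤ r * n + c := by omega
    have a2 : (¬c = 0 ∧ r * n + c - 1 < r * n + c + 1) ↔ ¬c = 0 := by omega
    have a2' : (¬c = 0 ∧ r * n + c - 1 < r * n + c) ↔ ¬c = 0 := by omega
    have a3 : (r * n + c < r * n + c + 1 ∧ ¬(if c + 1 < n then c + 1 else 0) = 0) ↔ c + 1 < n := by
      split_ifs with h <;> omega
    have a3' : ¬(r * n + c < r * n + c ∧ ¬(if c + 1 < n then c + 1 else 0) = 0) := fun h => absurd h.1 (lt_irrefl _)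
    have a4 : (r * n + c < r * n + c + 1 ∧ r * n + c + n < n * n) ↔ r + 1 < n :=
      ⟨fun h => hdown.mp h.2, fun h => ⟨by omega, hdown.mpr h⟩⟩
    have a4' : ¬(r * n + c < r * n + c ∧ r * n + c + n < n * n) := fun h => absurd h.1 (lt_irrefl _)
    simp only [a1, a1', a2, a2', a3, if_neg a3', a4, if_neg a4']
    by_cases hcc : c + 1 < n <;> by_cases hrr : r + 1 < n <;> simp [hcc, hrr]
  · by_cases hq2 : q = r * n + c + 1
    · -- q is the right neighbour: it gains this cell, if the edge exists
      have hn2 : 2 ≤ n := by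
        by_contra h
        have hn1 : n = 1 := by omega
        rw [hn1] at hr1 hc1 hq1
        have : r = 0 := by omega
        have : c = 0 := by omega
        omega
      subst hq2
      have ne0 : r * n + c + 1 ≠ r * n + c := by omega
      have ne2 : r * n + c + 1 ≠ r * n + c + n := by omega
      simp only [pvPartial, hm1, ne0, ne2, eq_self_iff_true, and_true, true_and, and_false,
        false_and, if_false]
      have a1 : (n ≤ r * n + c + 1 ∧ r * n + c + 1 - n < r * n + c + 1) ↔ n ≤ r * n + c + 1 := by omega
      have a1' : (n ≤ r * n + c + 1 ∧ r * n + c + 1 - n < r * n + c) ↔ n ≤ r * n + c + 1 := by omega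
      have a2 : (¬(if c + 1 < n then c + 1 else 0) = 0 ∧ r * n + c + 1 - 1 < r * n + c + 1) ↔ c + 1 < n := by
        split_ifs with h <;> omega
      have a2' : ¬(¬(if c + 1 < n then c + 1 else 0) = 0 ∧ r * n + c + 1 - 1 < r * n + c) := by
        split_ifs with h <;> omega
      have a3 : ¬(r * n + c + 1 < r * n + c + 1 ∧ ¬(r * n + c + 1 + 1) % n = 0) := fun h => absurd h.1 (lt_irrefl _)
      have a3' : ¬(r * n + c + 1 < r * n + c ∧ ¬(r * n + c + 1 + 1) % n = 0) := fun h => absurd h.1 (by omega)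
      have a4 : ¬(r * n + c + 1 < r * n + c + 1 ∧ r * n + c + 1 + n < n * n) := fun h => absurd h.1 (lt_irrefl _)
      have a4' : ¬(r * n + c + 1 < r * n + c ∧ r * n + c + 1 + n < n * n) := fun h => absurd h.1 (by omega)
      simp only [a1, a1', a2, if_neg a2', if_neg a3, if_neg a3', if_neg a4, if_neg a4']
      by_cases hcc : c + 1 < n <;> simp [hcc]
    · by_cases hq3 : q = r * n + c + n
      · -- q is the down neighbour: it gains this cell, if the edge exists
        have hrr : r + 1 < n := hdown.mp (by omega)
        have hn2 : 2 ≤ n := by omega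
        subst hq3
        have ne0 : r * n + c + n ≠ r * n + c := by omega
        have ne1 : r * n + c + n ≠ r * n + c + 1 := by omega
        have hmn : (r * n + c + n) % n = c := by
          have e : r * n + c + n = c + n * (r + 1) := by ring
          rw [e, Int.add_mul_emod_self_left, Int.emod_eq_of_lt hc0 hc1]
        simp only [pvPartial, hmn, ne0, ne1, eq_self_iff_true, and_true, true_and, and_false,
          false_and, if_false, hrr, if_true]
        have a1 : (n ≤ r * n + c + n ∧ r * n + c + n - n < r * n + c + 1) ↔ True :=
          iff_true_intro ⟨by omega, by omega⟩
        have a1' : ¬(n ≤ r * n + c + n ∧ r * n + c + n - n < r * n + c) := fun h => absurd h.2 (by omega)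
        have a2 : ¬(¬c = 0 ∧ r * n + c + n - 1 < r * n + c + 1) := fun h => absurd h.2 (by omega)
        have a2' : ¬(¬c = 0 ∧ r * n + c + n - 1 < r * n + c) := fun h => absurd h.2 (by omega)
        have a3 : ¬(r * n + c + n < r * n + c + 1 ∧ ¬(r * n + c + n + 1) % n = 0) := fun h => absurd h.1 (by omega)
        have a3' : ¬(r * n + c + n < r * n + c ∧ ¬(r * n + c + n + 1) % n = 0) := fun h => absurd h.1 (by omega)
        have a4 : ¬(r * n + c + n < r * n + c + 1 ∧ r * n + c + n + n < n * n) := fun h => absurd h.1 (by omega)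
        have a4' : ¬(r * n + c + n < r * n + c ∧ r * n + c + n + n < n * n) := fun h => absurd h.1 (by omega)
        simp only [a1, if_neg a1', if_neg a2, if_neg a2', if_neg a3, if_neg a3', if_neg a4, if_neg a4', if_true]
        simp
      · -- any other cell: nothing changes
        have e1 : (n ≤ q ∧ q - n < r * n + c + 1) ↔ (n ≤ q ∧ q - n < r * n + c) :=
          and_congr_right (fun _ => by omega)
        have e2 : (¬q % n = 0 ∧ q - 1 < r * n + c + 1) ↔ (¬q % n = 0 ∧ q - 1 < r * n + c) :=
          and_congr_right (fun _ => by omega)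
        have e3 : (q < r * n + c + 1) ↔ (q < r * n + c) := by omega
        simp only [pvPartial, e1, e2, e3, if_neg (show ¬(c + 1 < n ∧ q = r * n + c) from fun h => hqp h.2),
          if_neg (show ¬(c + 1 < n ∧ q = r * n + c + 1) from fun h => hq2 h.2),
          if_neg (show ¬(r + 1 < n ∧ q = r * n + c) from fun h => hqp h.2),
          if_neg (show ¬(r + 1 < n ∧ q = r * n + c + n) from fun h => hq3 h.2)]

-- the edge pass computes pvPartial n (n*n) at every cell
lemma edge_fold_eq (n : Int) (hn : 0 < n) :
    (PySem.List.pyRange 0 n 1).foldl (fun nbrs r =>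
      (PySem.List.pyRange 0 n 1).foldl (fun nbrs c =>
        let p := r * n + c
        let nbrs := if c + 1 < n then pvAppendAt (pvAppendAt nbrs p (p + 1)) (p + 1) p else nbrs
        if r + 1 < n then pvAppendAt (pvAppendAt nbrs p (p + n)) (p + n) p else nbrs) nbrs)
      ((PySem.List.pyRange 0 (n * n) 1).map (fun _ => ([] : List Int)))
    = (PySem.List.pyRange 0 (n * n) 1).map (fun p => pvPartial n (n * n) p) := by
  have hinit : ((PySem.List.pyRange 0 (n * n) 1).map (fun _ => ([] : List Int)))
      = (fun r : Int => (PySem.List.pyRange 0 (n * n) 1).map (fun p => pvPartial n (r * n) p)) 0 := by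
    simp only
    apply List.map_congr_left
    intro p hp
    obtain ⟨hp0, hp1⟩ := PySem.List.mem_pyRange_one.mp hp
    have hz : (0 : Int) * n = 0 := by ring
    rw [hz]
    unfold pvPartial
    rw [if_neg (by omega), if_neg ?_, if_neg (fun h => absurd h.1 (by omega)),
      if_neg (fun h => absurd h.1 (by omega))]
    · rfl
    · rintro ⟨hm2, hl2⟩
      have : p = 0 := by omega
      rw [this] at hm2
      exact hm2 (Int.zero_emod n)
  rw [hinit, foldl_range_sim _ (fun r : Int => (PySem.List.pyRange 0 (n * n) 1).map (fun p => pvPartial n (r * n) p)) 0 n (le_of_lt hn) ?_]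
  intro r hr0 hr1
  simp only
  have hT0 : ((PySem.List.pyRange 0 (n * n) 1).map (fun p => pvPartial n (r * n) p))
      = (fun c : Int => (PySem.List.pyRange 0 (n * n) 1).map (fun p => pvPartial n (r * n + c) p)) 0 := by
    show _ = (PySem.List.pyRange 0 (n * n) 1).map (fun p => pvPartial n (r * n + 0) p)
    norm_num
  rw [hT0, foldl_range_sim _ (fun c : Int => (PySem.List.pyRange 0 (n * n) 1).map (fun p => pvPartial n (r * n + c) p)) 0 n (le_of_lt hn) ?_]
  · show (PySem.List.pyRange 0 (n * n) 1).map (fun p => pvPartial n (r * n + n) p)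
        = (PySem.List.pyRange 0 (n * n) 1).map (fun p => pvPartial n ((r + 1) * n) p)
    rw [show r * n + n = (r + 1) * n from by ring]
  · intro c hc0 hc1
    obtain ⟨hp0, hplt, hm, hup, hdown, hm1⟩ := cell_facts n r c hn hr0 hr1 hc0 hc1
    simp only
    by_cases hcc : c + 1 < n <;> by_cases hrr : r + 1 < n
    · have hp1lt : r * n + c + 1 < n * n := by
        have := (cell_facts n r (c + 1) hn hr0 hr1 (by omega) hcc).2.1
        omega
      have hpnlt : r * n + c + n < n * n := hdown.mpr hrr
      rw [if_pos hcc, if_pos hrr,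
        appendAt_map_pyRange0 _ _ hp0 hplt,
        appendAt_map_pyRange0 _ _ (by omega) hp1lt,
        appendAt_map_pyRange0 _ _ hp0 hplt,
        appendAt_map_pyRange0 _ _ (by omega) hpnlt]
      apply List.map_congr_left
      intro q hq
      obtain ⟨hq0, hq1⟩ := PySem.List.mem_pyRange_one.mp hq
      rw [show r * n + (c + 1) = r * n + c + 1 from by ring, partial_next n r c q hn hr0 hr1 hc0 hc1 hq0 hq1]
      simp only [hcc, hrr, true_and]
    · have hp1lt : r * n + c + 1 < n * n := by
        have := (cell_facts n r (c + 1) hn hr0 hr1 (by omega) hcc).2.1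
        omega
      rw [if_pos hcc, if_neg hrr,
        appendAt_map_pyRange0 _ _ hp0 hplt,
        appendAt_map_pyRange0 _ _ (by omega) hp1lt]
      apply List.map_congr_left
      intro q hq
      obtain ⟨hq0, hq1⟩ := PySem.List.mem_pyRange_one.mp hq
      rw [show r * n + (c + 1) = r * n + c + 1 from by ring, partial_next n r c q hn hr0 hr1 hc0 hc1 hq0 hq1]
      simp only [hcc, hrr, true_and, false_and, if_false]
    · have hpnlt : r * n + c + n < n * n := hdown.mpr hrr
      rw [if_neg hcc, if_pos hrr,
        appendAt_map_pyRange0 _ _ hp0 hplt,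
        appendAt_map_pyRange0 _ _ (by omega) hpnlt]
      apply List.map_congr_left
      intro q hq
      obtain ⟨hq0, hq1⟩ := PySem.List.mem_pyRange_one.mp hq
      rw [show r * n + (c + 1) = r * n + c + 1 from by ring, partial_next n r c q hn hr0 hr1 hc0 hc1 hq0 hq1]
      simp only [hcc, hrr, true_and, false_and, if_false]
    · rw [if_neg hcc, if_neg hrr]
      apply List.map_congr_left
      intro q hq
      obtain ⟨hq0, hq1⟩ := PySem.List.mem_pyRange_one.mp hq
      rw [show r * n + (c + 1) = r * n + c + 1 from by ring, partial_next n r c q hn hr0 hr1 hc0 hc1 hq0 hq1]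
      simp only [hcc, hrr, false_and, if_false]

lemma A_items (n d : Int) (hn : 0 < n) : create_rect_grah n d = pvGrah n d (n * n) := by
  unfold create_rect_grah
  exact congrArg PySem.Dict.items (graph_fold_eq n d hn
    (fun r c => ((([(r - 1, c), (r, c - 1), (r, c + 1), (r + 1, c)] : List (Int × Int)).foldl
        (fun line node => if node.1 < n ∧ 0 ≤ node.1 ∧ node.2 < n ∧ 0 ≤ node.2 then
          line.insert (node.1 * n + node.2 + 1) d else line) (PySem.Dict.mk [])).insert
        (r * n + c + 1) 0).items)
    (fun r c hr0 hr1 hc0 hc1 => lineA_items n d r c hn hr0 hr1 hc0 hc1))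

lemma B_items (n d : Int) (hn : 0 < n) : create_rect_grah_alt n d = pvGrah n d (n * n) := by
  simp only [create_rect_grah_alt]
  rw [init_eq n hn, edge_fold_eq n hn]
  exact congrArg PySem.Dict.items (graph_fold_eq n d hn
    (fun r c => (((pvGetAt ((PySem.List.pyRange 0 (n * n) 1).map (fun p => pvPartial n (n * n) p))
          (r * n + c)).foldl (fun line q => line.insert (q + 1) d)
        (PySem.Dict.mk [])).insert (r * n + c + 1) 0).items)
    (fun r c hr0 hr1 hc0 hc1 => by
      have hp0 := (cell_facts n r c hn hr0 hr1 hc0 hc1).1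
      have hplt := (cell_facts n r c hn hr0 hr1 hc0 hc1).2.1
      beta_reduce
      rw [getAt_map_pyRange0 _ hp0 hplt]
      exact lineB_items n d r c hn hr0 hr1 hc0 hc1))

lemma trivial_case (n d : Int) (hn : n ≤ 0) : create_rect_grah n d = create_rect_grah_alt n d := by
  unfold create_rect_grah create_rect_grah_alt
  rw [pyRange_one_nil hn]
  rfl

-- ===== VERDICT (by name: the statement is the Claim_ definition above) =====
theorem create_rect_grah_spec : Claim_equal_create_rect_grah := by
  intro n d _
  unfold Spec_create_rect_grah
  by_cases hn : 0 < n
  · rw [A_items n d hn, B_items n d hn]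
  · exact trivial_case n d (by omega)
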